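-- pv_equiv track=rewrite | github.com/hyjcde/PVcountingLLM | rgb_segmentation_test.py | _cluster_coordinates
-- ===== SOURCE A (Python) =====
-- from typing import Any, Dict, List, Tuple
--
-- def _cluster_coordinates(coords: List[int], tolerance: int = 30) -> List[int]:
--     """聚类坐标"""
--     if not coords:
--         return []
--
--     coords_sorted = sorted(coords)
--     clusters = []
--     current_cluster = [coords_sorted[0]]
--
--     for coord in coords_sorted[1:]:
--         if coord - current_cluster[-1] <= tolerance:
--             current_cluster.append(coord)
--         else:
--             cluster_center = sum(current_cluster) // len(current_cluster)
--             clusters.append(cluster_center)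
--             current_cluster = [coord]
--
--     if current_cluster:
--         cluster_center = sum(current_cluster) // len(current_cluster)
--         clusters.append(cluster_center)
--
--     return clusters
-- ===== SOURCE B (Python) =====
-- def _cluster_coordinates(coords, tolerance=30):
--     """Cluster 1D coordinates: sort, then repeatedly carve off the maximal
--     gap-free prefix segment and reduce it to its integer-mean center."""
--     rest = sorted(coords)
--     centers = []
--     while rest:
--         k = 1
--         while k < len(rest) and rest[k] - rest[k - 1] <= tolerance:
--             k += 1
--         centers.append(sum(rest[:k]) // k)
--         rest = rest[k:]
--     return centers
-- ===== Notes on version B (the rewrite author's own statement) =====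
-- stated objective: alternative
-- what changed: Replaces A's accumulate-or-flush loop with per-state cluster list by a span-and-split decomposition: after sorting, repeatedly find the length of the maximal gap-free prefix, emit that segment's floor-mean, and recurse on the remainder.
import Mathlib
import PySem

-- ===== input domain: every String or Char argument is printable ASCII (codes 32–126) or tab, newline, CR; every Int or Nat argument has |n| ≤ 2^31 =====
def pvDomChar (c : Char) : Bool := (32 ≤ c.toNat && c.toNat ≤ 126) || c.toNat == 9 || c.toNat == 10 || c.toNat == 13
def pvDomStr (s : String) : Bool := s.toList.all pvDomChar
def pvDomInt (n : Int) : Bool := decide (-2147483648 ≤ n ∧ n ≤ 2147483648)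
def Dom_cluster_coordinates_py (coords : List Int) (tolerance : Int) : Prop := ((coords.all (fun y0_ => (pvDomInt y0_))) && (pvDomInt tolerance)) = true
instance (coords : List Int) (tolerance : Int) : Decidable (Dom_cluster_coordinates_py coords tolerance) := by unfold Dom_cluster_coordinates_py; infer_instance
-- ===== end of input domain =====

-- B replaces A's accumulate-or-flush loop by a span-and-split decomposition (find the
-- maximal gap-free prefix, emit its floor-mean, recurse on the rest); objective: alternative.

-- ===== PORT A =====
-- one loop step of A: extend current_cluster or flush its center and restart
def pvStepA (tolerance : Int) (st : List Int × List Int) (coord : Int) : List Int × List Int :=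
  if coord - st.2.getLastD 0 ≤ tolerance then (st.1, st.2 ++ [coord])
  else (st.1 ++ [PySem.Int.floordiv st.2.sum (st.2.length : Int)], [coord])

def cluster_coordinates_py (coords : List Int) (tolerance : Int) : List Int :=
  if coords = [] then []
  else
    let s := PySem.List.sorted coords (fun x => x) false
    let st := (s.drop 1).foldl (pvStepA tolerance) ([], [s.headD 0])
    if st.2 ≠ [] then st.1 ++ [PySem.Int.floordiv st.2.sum (st.2.length : Int)] else st.1

-- ===== PORT B =====
-- length of the maximal chain continuing from prev with adjacent gaps ≤ tolerance
def pvSpanLen (tolerance : Int) (prev : Int) : List Int → Nat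
  | [] => 0
  | c :: rs => if c - prev ≤ tolerance then pvSpanLen tolerance c rs + 1 else 0

-- carve off the maximal gap-free prefix, emit its floor-mean, recurse on the remainder
def pvGo (tolerance : Int) : List Int → List Int
  | [] => []
  | x :: rs =>
      let m := pvSpanLen tolerance x rs
      let seg := x :: rs.take m
      PySem.Int.floordiv seg.sum (seg.length : Int) :: pvGo tolerance (rs.drop m)
  termination_by l => l.length
  decreasing_by simp

def cluster_coordinates_py_alt (coords : List Int) (tolerance : Int) : List Int :=
  pvGo tolerance (PySem.List.sorted coords (fun x => x) false)

-- ===== PRECONDITION & SPEC =====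
def Spec_cluster_coordinates_py (coords : List Int) (tolerance : Int) (out : List Int) : Prop := out = cluster_coordinates_py_alt coords tolerance
instance (coords : List Int) (tolerance : Int) (out : List Int) : Decidable (Spec_cluster_coordinates_py coords tolerance out) := by unfold Spec_cluster_coordinates_py; infer_instance

-- ===== CLAIM (what is proved, stated in full; the proofs are below) =====
def Claim_equal_cluster_coordinates_py : Prop := ∀ (coords : List Int) (tolerance : Int), Dom_cluster_coordinates_py coords tolerance → Spec_cluster_coordinates_py coords tolerance (cluster_coordinates_py coords tolerance)

-- ===== LEMMAS AND PROOFS =====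

lemma pvGo_nil (tolerance : Int) : pvGo tolerance [] = [] := by
  unfold pvGo
  rfl

lemma pvGo_cons (tolerance x : Int) (rs : List Int) :
    pvGo tolerance (x :: rs) =
      PySem.Int.floordiv ((x :: rs.take (pvSpanLen tolerance x rs)).sum)
          (((x :: rs.take (pvSpanLen tolerance x rs)).length : Nat) : Int)
        :: pvGo tolerance (rs.drop (pvSpanLen tolerance x rs)) := by
  rw [pvGo]

lemma pvGetLastD_one (c d : Int) : ([c] : List Int).getLastD d = c := rfl

lemma pvFoldA_snd_ne (tolerance : Int) :
    ∀ (rest cls cur : List Int), cur ≠ [] →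
      (rest.foldl (pvStepA tolerance) (cls, cur)).2 ≠ [] := by
  intro rest
  induction rest with
  | nil => intro cls cur h; simpa using h
  | cons c rs ih =>
      intro cls cur h
      simp only [List.foldl_cons, pvStepA]
      split
      · exact ih _ _ (by simp)
      · exact ih _ _ (by simp)

lemma pvFoldA_eq (tolerance : Int) :
    ∀ (rest cur cls : List Int), cur ≠ [] →
      (let st := rest.foldl (pvStepA tolerance) (cls, cur)
       st.1 ++ [PySem.Int.floordiv st.2.sum (st.2.length : Int)]) =
      cls ++ (PySem.Int.floordiv
                ((cur ++ rest.take (pvSpanLen tolerance (cur.getLastD 0) rest)).sum)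
                (((cur ++ rest.take (pvSpanLen tolerance (cur.getLastD 0) rest)).length : Nat) : Int)
              :: pvGo tolerance (rest.drop (pvSpanLen tolerance (cur.getLastD 0) rest))) := by
  intro rest
  induction rest with
  | nil =>
      intro cur cls h
      simp [pvSpanLen, pvGo_nil]
  | cons c rs ih =>
      intro cur cls h
      simp only [List.foldl_cons, pvStepA, pvSpanLen]
      by_cases hc : c - cur.getLastD 0 ≤ tolerance
      · rw [if_pos hc, if_pos hc]
        have := ih (cur ++ [c]) cls (by simp)
        simp only [List.getLastD_concat] at this
        rw [this]
        simp [List.append_assoc]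
      · rw [if_neg hc, if_neg hc]
        have := ih [c] (cls ++ [PySem.Int.floordiv cur.sum (cur.length : Int)]) (by simp)
        simp only [pvGetLastD_one] at this
        rw [this]
        simp [pvGo_cons, List.append_assoc]

lemma pvSorted_nil : PySem.List.sorted ([] : List Int) (fun x => x) false = [] := by
  have h := PySem.List.length_sorted ([] : List Int) (fun x => x) false
  exact List.length_eq_zero_iff.mp (by simpa using h)

-- ===== VERDICT (by name: the statement is the Claim_ definition above) =====
theorem cluster_coordinates_py_spec : Claim_equal_cluster_coordinates_py := by
  intro coords tolerance _
  unfold Spec_cluster_coordinates_py cluster_coordinates_py cluster_coordinates_py_alt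
  by_cases hnil : coords = []
  · simp [hnil, pvSorted_nil, pvGo_nil]
  · rw [if_neg hnil]
    have hlen : (PySem.List.sorted coords (fun x => x) false).length = coords.length :=
      PySem.List.length_sorted coords (fun x => x) false
    cases hs : PySem.List.sorted coords (fun x => x) false with
    | nil =>
        exfalso
        rw [hs] at hlen
        exact hnil (List.length_eq_zero_iff.mp hlen.symm)
    | cons x t =>
        have hne : ([x] : List Int) ≠ [] := by simp
        have hsnd := pvFoldA_snd_ne tolerance t [] [x] hne
        have heq := pvFoldA_eq tolerance t [x] [] hne
        simp only [pvGetLastD_one] at heq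
        simp only [List.headD_cons, List.drop_one, List.tail_cons, if_pos hsnd]
        rw [heq]
        simp [pvGo_cons]
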